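-- pv_equiv track=rewrite | github.com/ActiveState/code | recipes/Python/535129_Groupby_hierarchy_tree/recipe-535129.py | groupby2
-- ===== SOURCE A (Python) =====
-- from operator import itemgetter
-- from itertools import groupby
--
-- def groupby2(cols, lst, lev=0):
--     if not cols:
--         return str(list(lst))
--     keyfun = itemgetter(cols[0])
--     srted  = sorted(list(lst), key=keyfun)
--     output = ""
--     for key, iter in groupby(srted, key=keyfun):
--         output += "\n"+"   "*lev+"%10s:"%key
--         output += groupby2(cols[1:], iter, lev+1)
--     return output
-- ===== SOURCE B (Python) =====
-- def groupby2(cols, lst, lev=0):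
--     if not cols:
--         return str(list(lst))
--     c = cols[0]
--     buckets = {}
--     for row in lst:
--         key = row[c]
--         buckets[key] = buckets.get(key, []) + [row]
--     output = ""
--     for key in sorted(buckets):
--         output += "\n" + "   "*lev + "%10s:" % key
--         output += groupby2(cols[1:], buckets[key], lev+1)
--     return output
-- ===== Notes on version B (the rewrite author's own statement) =====
-- stated objective: alternative
-- what changed: Replaces A's sort-all-rows + itertools.groupby adjacent-run scan at each level by a single pass that buckets rows into a dict keyed by the column value (insertion order preserves the stable within-group order) followed by one pass over the sorted keys.
import Mathlib
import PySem

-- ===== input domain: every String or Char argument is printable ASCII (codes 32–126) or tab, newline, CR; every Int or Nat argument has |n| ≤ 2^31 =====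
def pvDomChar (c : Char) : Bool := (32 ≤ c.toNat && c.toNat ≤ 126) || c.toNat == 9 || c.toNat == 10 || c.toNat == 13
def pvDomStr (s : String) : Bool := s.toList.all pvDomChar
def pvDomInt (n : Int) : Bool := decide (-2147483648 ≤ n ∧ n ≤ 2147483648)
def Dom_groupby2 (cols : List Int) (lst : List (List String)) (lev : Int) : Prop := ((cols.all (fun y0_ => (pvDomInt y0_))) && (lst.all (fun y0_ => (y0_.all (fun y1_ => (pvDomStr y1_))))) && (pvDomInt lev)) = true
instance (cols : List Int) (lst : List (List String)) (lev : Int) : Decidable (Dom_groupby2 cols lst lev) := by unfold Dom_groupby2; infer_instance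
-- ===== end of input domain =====

-- B replaces A's sort-the-rows + itertools.groupby adjacent scan by a one-pass dict of
-- buckets followed by a sorted-keys pass (objective: alternative decomposition, same result).

-- shared formatting helpers (the corresponding Python expressions are identical in A and B):
-- repr of one character inside a quote-q string literal (exact on printable ASCII + tab/newline/CR)
def pyReprChar (q : Char) (c : Char) : List Char :=
  if c = '\\' then ['\\', '\\']
  else if c = q then ['\\', q]
  else if c = '\t' then ['\\', 't']
  else if c = '\n' then ['\\', 'n']
  else if c = '\r' then ['\\', 'r']
  else [c]

-- Python repr(s) for strings over printable ASCII + tab/newline/CR (CPython's quote-choice rule)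
def pyReprStr (s : String) : String :=
  let cs := s.toList
  let q : Char := if cs.contains '\'' && !(cs.contains '"') then '"' else '\''
  String.ofList ((q :: cs.flatMap (pyReprChar q)) ++ [q])

def pyReprRow (row : List String) : String :=
  "[" ++ String.intercalate ", " (row.map pyReprStr) ++ "]"

-- str(list(lst)) for a list of lists of strings
def pyReprRows (lst : List (List String)) : String :=
  "[" ++ String.intercalate ", " (lst.map pyReprRow) ++ "]"

-- "   " * lev
def indentStr (lev : Int) : String := String.ofList (PySem.List.pyRepeat "   ".toList lev)

-- "%10s" % k
def pctS10 (k : String) : String := String.ofList (List.replicate (10 - k.toList.length) ' ') ++ k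

-- itemgetter(cols[0])(row); total stand-in: the "" default is never reached on inputs admitted by Pre_
def keyOf (c : Int) (row : List String) : String := (PySem.List.pyGet? row c).getD ""

-- ===== PORT A =====
-- itertools.groupby(srted, key=f): runs of adjacent rows with equal key
def runsBy (f : List String → String) : List (List String) → List (String × List (List String))
  | [] => []
  | x :: xs =>
      (f x, x :: xs.takeWhile (fun y => f y == f x)) ::
        runsBy f (xs.dropWhile (fun y => f y == f x))
  termination_by l => l.length
  decreasing_by
    simpa using Nat.lt_succ_of_le (List.length_dropWhile_le _ _)

def groupby2 : List Int → List (List String) → Int → String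
  | [], lst, _ => pyReprRows lst
  | c :: rest, lst, lev =>
      (runsBy (keyOf c) (PySem.List.sorted lst (keyOf c))).foldl
        (fun out kg =>
          out ++ ("\n" ++ indentStr lev ++ pctS10 kg.1 ++ ":") ++ groupby2 rest kg.2 (lev + 1))
        ""
  termination_by cols _ _ => cols.length

-- ===== PORT B =====
def groupby2_alt : List Int → List (List String) → Int → String
  | [], lst, _ => pyReprRows lst
  | c :: rest, lst, lev =>
      let buckets :=
        lst.foldl (fun d row => d.modify (keyOf c row) [] (· ++ [row])) PySem.Dict.empty
      (PySem.List.sorted buckets.keys (fun k => k)).foldl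
        (fun out k =>
          out ++ ("\n" ++ indentStr lev ++ pctS10 k ++ ":") ++
            groupby2_alt rest (buckets.getD k []) (lev + 1))
        ""
  termination_by cols _ _ => cols.length

-- ===== PRECONDITION & SPEC =====
-- Pre_ excludes exactly the inputs where A raises IndexError: some row of lst lacks one of
-- the requested column indices (itemgetter is applied to every row at every level).
def Pre_groupby2 (cols : List Int) (lst : List (List String)) (lev : Int) : Prop :=
  ∀ row ∈ lst, ∀ cc ∈ cols, (PySem.List.pyGet? row cc).isSome = true
instance (cols : List Int) (lst : List (List String)) (lev : Int) : Decidable (Pre_groupby2 cols lst lev) := by unfold Pre_groupby2; infer_instance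

def pvWitness_groupby2 : List Int × List (List String) × Int :=
  ([0, 1], [["b", "x"], ["a", "y"], ["a", "x"]], 0)

def Spec_groupby2 (cols : List Int) (lst : List (List String)) (lev : Int) (out : String) : Prop := out = groupby2_alt cols lst lev
instance (cols : List Int) (lst : List (List String)) (lev : Int) (out : String) : Decidable (Spec_groupby2 cols lst lev out) := by unfold Spec_groupby2; infer_instance

-- ===== CLAIM (what is proved, stated in full; the proofs are below) =====
def Claim_equal_groupby2 : Prop := ∀ (cols : List Int) (lst : List (List String)) (lev : Int), Dom_groupby2 cols lst lev → Pre_groupby2 cols lst lev → Spec_groupby2 cols lst lev (groupby2 cols lst lev)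

-- ===== LEMMAS AND PROOFS =====

-- insertBy into a key-sorted list keeps it key-sorted
lemma pairwise_insertBy (f : List String → String) (x : List String) (ys : List (List String))
    (h : ys.Pairwise (fun a b => f a ≤ f b)) :
    (PySem.List.insertBy (fun a b => decide (f a < f b)) x ys).Pairwise (fun a b => f a ≤ f b) := by
  induction ys with
  | nil => simp [PySem.List.insertBy]
  | cons y t ih =>
    rw [List.pairwise_cons] at h
    obtain ⟨hy, ht⟩ := h
    rw [PySem.List.insertBy]
    by_cases hlt : f x < f y
    · simp only [hlt, decide_true, if_true]
      refine List.Pairwise.cons ?_ (List.Pairwise.cons hy ht)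
      intro z hz
      rcases List.mem_cons.mp hz with rfl | hz
      · exact le_of_lt hlt
      · exact le_trans (le_of_lt hlt) (hy z hz)
    · simp only [hlt, decide_false, Bool.false_eq_true, if_false]
      refine List.Pairwise.cons ?_ (ih ht)
      intro z hz
      rcases (PySem.List.mem_insertBy _ _ _ _).mp hz with rfl | hz
      · exact le_of_not_gt hlt
      · exact hy z hz

-- stability of one insertion, seen through a key-filter
lemma filter_insertBy (f : List String → String) (k : String) (x : List String)
    (ys : List (List String)) (h : ys.Pairwise (fun a b => f a ≤ f b)) :
    (PySem.List.insertBy (fun a b => decide (f a < f b)) x ys).filter (fun y => f y == k)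
      = if f x == k then ys.filter (fun y => f y == k) ++ [x]
        else ys.filter (fun y => f y == k) := by
  induction ys with
  | nil => rw [PySem.List.insertBy]; by_cases hk : f x == k <;> simp [hk]
  | cons y t ih =>
    rw [List.pairwise_cons] at h
    obtain ⟨hy, ht⟩ := h
    rw [PySem.List.insertBy]
    by_cases hlt : f x < f y
    · simp only [hlt, decide_true, if_true]
      by_cases hk : f x == k
      · have hkx : f x = k := by simpa using hk
        have hnil : (y :: t).filter (fun z => f z == k) = [] := by
          rw [List.filter_eq_nil_iff]
          intro z hz
          have hyz : f y ≤ f z := by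
            rcases List.mem_cons.mp hz with rfl | hz
            · exact le_refl _
            · exact hy z hz
          have : k < f z := lt_of_lt_of_le (hkx ▸ hlt) hyz
          simp [ne_of_gt this]
        simp [hk, hnil]
      · simp [List.filter_cons, hk]
    · simp only [hlt, decide_false, Bool.false_eq_true, if_false]
      rw [List.filter_cons, List.filter_cons, ih ht]
      by_cases hyk : f y == k <;> by_cases hk : f x == k <;> simp [hyk, hk]

-- the insertion-sort fold, seen through a key-filter
lemma foldl_insertBy_filter (f : List String → String) (k : String) :
    ∀ (xs acc : List (List String)), acc.Pairwise (fun a b => f a ≤ f b) →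
    (xs.foldl (fun a x => PySem.List.insertBy (fun a b => decide (f a < f b)) x a) acc).filter
        (fun y => f y == k)
      = acc.filter (fun y => f y == k) ++ xs.filter (fun y => f y == k) := by
  intro xs
  induction xs with
  | nil => intro acc _; simp
  | cons x t ih =>
    intro acc hacc
    rw [List.foldl_cons, ih _ (pairwise_insertBy f x acc hacc), filter_insertBy f k x acc hacc,
      List.filter_cons]
    by_cases hk : f x == k <;> simp [hk]

-- stability of Python's sort: rows with a fixed key keep their original order
lemma sorted_filter_key (f : List String → String) (k : String) (lst : List (List String)) :
    (PySem.List.sorted lst f).filter (fun y => f y == k) = lst.filter (fun y => f y == k) := by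
  rw [PySem.List.sorted_eq_foldl_insertBy, foldl_insertBy_filter f k lst [] (by simp)]
  simp

-- characterisation of the groupby runs of a key-sorted list: the run keys are strictly
-- increasing, they are exactly the keys occurring in xs, and each run is a key-filter of xs
lemma runsBy_props (f : List String → String) : ∀ (xs : List (List String)),
    xs.Pairwise (fun a b => f a ≤ f b) →
    ((runsBy f xs).map Prod.fst).Pairwise (· < ·)
    ∧ (∀ k, k ∈ (runsBy f xs).map Prod.fst ↔ k ∈ xs.map f)
    ∧ runsBy f xs
        = ((runsBy f xs).map Prod.fst).map (fun k => (k, xs.filter (fun y => f y == k))) := by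
  intro xs
  induction xs using runsBy.induct (f := f) with
  | case1 => intro _; simp [runsBy]
  | case2 x xs ih =>
    intro h
    rw [List.pairwise_cons] at h
    obtain ⟨hx, hxs⟩ := h
    set g := xs.takeWhile (fun y => f y == f x) with hg
    set r := xs.dropWhile (fun y => f y == f x) with hr
    have hsplit : g ++ r = xs := List.takeWhile_append_dropWhile
    have hgkey : ∀ z ∈ g, f z = f x := by
      intro z hz
      have := List.mem_takeWhile_imp hz
      simpa using this
    have hrkey : ∀ z ∈ r, f x < f z := by
      intro z hz
      rcases hrn : r with _ | ⟨y, t⟩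
      · rw [hrn] at hz; simp at hz
      · have hy : ¬ (f y == f x) = true := by
          have := List.head?_dropWhile_not (fun y => f y == f x) xs
          rw [← hr, hrn] at this; simpa using this
        have hyne : f y ≠ f x := by simpa using hy
        have hyxs : y ∈ xs := by
          rw [← hsplit, hrn]; exact List.mem_append_right _ (by simp)
        have hylt : f x < f y := lt_of_le_of_ne (hx y hyxs) (Ne.symm hyne)
        rw [hrn] at hz
        rcases List.mem_cons.mp hz with rfl | hzt
        · exact hylt
        · have hpr : r.Pairwise (fun a b => f a ≤ f b) := by
            have : r.Sublist xs := by rw [hr]; exact List.dropWhile_sublist _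
            exact hxs.sublist this
          rw [hrn, List.pairwise_cons] at hpr
          exact lt_of_lt_of_le hylt (hpr.1 z hzt)
    have hpr : r.Pairwise (fun a b => f a ≤ f b) :=
      hxs.sublist (by rw [hr]; exact List.dropWhile_sublist _)
    obtain ⟨ih1, ih2, ih3⟩ := ih hpr
    have hrunsdef : runsBy f (x :: xs)
        = (f x, x :: g) :: runsBy f r := by rw [runsBy]
    have hkr : ∀ k, k ∈ (runsBy f r).map Prod.fst → f x < k := by
      intro k hk
      rcases List.mem_map.mp ((ih2 k).mp hk) with ⟨z, hz, rfl⟩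
      exact hrkey z hz
    refine ⟨?_, ?_, ?_⟩
    · rw [hrunsdef]
      simp only [List.map_cons]
      exact List.Pairwise.cons (by intro k hk; exact hkr k hk) ih1
    · intro k
      rw [hrunsdef]
      simp only [List.map_cons, List.mem_cons, ih2 k, ← hsplit, List.map_append,
        List.mem_append]
      constructor
      · rintro (rfl | hk)
        · exact Or.inl rfl
        · exact Or.inr (Or.inr hk)
      · rintro (rfl | hk | hk)
        · exact Or.inl rfl
        · rcases List.mem_map.mp hk with ⟨z, hz, rfl⟩
          exact Or.inl (hgkey z hz)
        · exact Or.inr hk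
    · obtain ⟨K, hK⟩ : ∃ K, (runsBy f r).map Prod.fst = K := ⟨_, rfl⟩
      rw [hK] at ih3 hkr
      rw [hrunsdef, ih3]
      simp only [List.map_cons, List.map_map]
      have hid : (Prod.fst ∘ fun k => (k, List.filter (fun y => f y == k) r)) = id := by
        funext k; rfl
      rw [hid]
      simp only [Function.comp_id]
      congr 1
      · have h1 : xs.filter (fun y => f y == f x) = g := by
          rw [← hsplit, List.filter_append]
          have hgf : g.filter (fun y => f y == f x) = g :=
            List.filter_eq_self.mpr (by intro z hz; simpa using hgkey z hz)
          have hrf : r.filter (fun y => f y == f x) = [] :=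
            List.filter_eq_nil_iff.mpr (by intro z hz; simpa using ne_of_gt (hrkey z hz))
          rw [hgf, hrf, List.append_nil]
        simp [h1]
      · apply List.map_congr_left
        intro k hk
        have hlt : f x < k := hkr k hk
        have hxf : ¬ (f x == k) = true := by simpa using ne_of_lt hlt
        have hfilt : (x :: xs).filter (fun y => f y == k) = r.filter (fun y => f y == k) := by
          rw [List.filter_cons, if_neg hxf, ← hsplit, List.filter_append]
          have hgf : g.filter (fun y => f y == k) = [] :=
            List.filter_eq_nil_iff.mpr (by
              intro z hz
              have : f z = f x := hgkey z hz
              simpa [this] using ne_of_lt hlt)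
          rw [hgf, List.nil_append]
        rw [hfilt]

-- B's bucket for key k is the key-k filter of lst
lemma buckets_getD (f : List String → String) (lst : List (List String)) (k : String) :
    ((lst.foldl (fun d row => d.modify (f row) [] (· ++ [row])) PySem.Dict.empty).getD k [])
      = lst.filter (fun y => f y == k) := by
  have h1 : lst.foldl (fun d row => d.modify (f row) [] (· ++ [row])) PySem.Dict.empty
      = (lst.map (fun r => (f r, r))).foldl (fun d p => d.modify p.1 [] (· ++ [p.2]))
          PySem.Dict.empty := by
    rw [List.foldl_map]
  rw [h1, PySem.Dict.getD_foldl_modify_append, List.filter_map]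
  simp [Function.comp_def]

-- B's sorted key list equals A's run-key list
lemma keys_eq (c : Int) (lst : List (List String)) :
    PySem.List.sorted
        (lst.foldl (fun d row => d.modify (keyOf c row) [] (· ++ [row])) PySem.Dict.empty).keys
        (fun k => k)
      = (runsBy (keyOf c) (PySem.List.sorted lst (keyOf c))).map Prod.fst := by
  set f := keyOf c with hf
  obtain ⟨h1, h2, _⟩ := runsBy_props f (PySem.List.sorted lst f) (PySem.List.sorted_pairwise lst f)
  have hkeys : (lst.foldl (fun d row => d.modify (f row) [] (· ++ [row])) PySem.Dict.empty).keys
      = PySem.Set.ofList (lst.map f) := by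
    rw [PySem.Dict.keys_foldl_modify_key lst f [] (fun _ row => (· ++ [row]))]
    simp [PySem.Set.ofList_eq_foldl, PySem.Set.update, PySem.Dict.keys_empty]
  rw [hkeys]
  apply PySem.List.sorted_eq_of_perm_of_pairwise_lt
  · apply (List.perm_ext_iff_of_nodup ?_ ?_).mpr
    · intro k
      rw [h2 k, PySem.Set.mem_ofList]
      exact ((PySem.List.sorted_perm lst f false).map f).mem_iff
    · exact List.Pairwise.imp ne_of_lt h1
    · exact PySem.Set.nodup_ofList _
  · exact h1

lemma main_eq : ∀ (cols : List Int) (lst : List (List String)) (lev : Int),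
    groupby2 cols lst lev = groupby2_alt cols lst lev := by
  intro cols
  induction cols with
  | nil => intro lst lev; rw [groupby2, groupby2_alt]
  | cons c rest ih =>
    intro lst lev
    rw [groupby2, groupby2_alt]
    set f := keyOf c with hf
    obtain ⟨_, _, h3⟩ := runsBy_props f (PySem.List.sorted lst f) (PySem.List.sorted_pairwise lst f)
    rw [keys_eq c lst]
    conv_lhs => rw [h3]
    rw [List.foldl_map]
    apply PySem.List.foldl_congr_mem
    intro acc k hk
    simp only
    rw [buckets_getD f lst k, sorted_filter_key f k lst, ih]

-- ===== VERDICT (by name: the statement is the Claim_ definition above) =====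
theorem groupby2_spec : Claim_equal_groupby2 := by
  intro cols lst lev _ _
  exact main_eq cols lst lev
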